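-- pv_equiv track=rewrite | github.com/LukeFarrell/Google_Foo_Bar | Solution_6.py | rearange
-- ===== SOURCE A (Python) =====
-- def rearange(old,terminal,nonTerminal):
--     #rearange the matrix
--     t = terminal+nonTerminal
--     new = [[0 for x in range(len(old))] for x in range(len(old))]
--     for i in range(len(old)):
--         for j in range(len(old)):
--             new[i][j] = old[t[i]][t[j]]
--     for i in range(len(terminal)):
--         new[i][i] =1
--     #Extreme Indexing to divide the matrix
--     I = [[new[i][j] for j in range(len(terminal))] for i in range(len(terminal))]
--     R = [[new[::-1][i][j] for j in range(len(terminal))] for i in range(len(nonTerminal))][::-1]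
--     Q = [[new[::-1][i][::-1][j] for j in range(len(nonTerminal))][::-1] for i in range(len(nonTerminal))][::-1]
--     return I, R, Q
-- ===== SOURCE B (Python) =====
-- def rearange(old, terminal, nonTerminal):
--     # Build the I, R, Q blocks directly, entry by entry, from old:
--     # no intermediate permuted matrix, no mutation, no reversal slicing.
--     n, k, m = len(old), len(terminal), len(nonTerminal)
--     t = terminal + nonTerminal
--
--     def e(i, j):
--         return 1 if i == j and i < k else old[t[i]][t[j]]
--
--     I = [[e(i, j) for j in range(k)] for i in range(k)]
--     R = [[e(n - m + i, j) for j in range(k)] for i in range(m)]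
--     Q = [[e(n - m + i, n - m + j) for j in range(m)] for i in range(m)]
--     return I, R, Q
-- ===== Notes on version B (the rewrite author's own statement) =====
-- stated objective: simpler
-- what changed: B drops A's intermediate permuted n×n matrix, its in-place mutation and its reversal-based slicing entirely, computing the I, R, Q blocks entry by entry from old via one entry function and explicit bottom-right block offsets.
import Mathlib
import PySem

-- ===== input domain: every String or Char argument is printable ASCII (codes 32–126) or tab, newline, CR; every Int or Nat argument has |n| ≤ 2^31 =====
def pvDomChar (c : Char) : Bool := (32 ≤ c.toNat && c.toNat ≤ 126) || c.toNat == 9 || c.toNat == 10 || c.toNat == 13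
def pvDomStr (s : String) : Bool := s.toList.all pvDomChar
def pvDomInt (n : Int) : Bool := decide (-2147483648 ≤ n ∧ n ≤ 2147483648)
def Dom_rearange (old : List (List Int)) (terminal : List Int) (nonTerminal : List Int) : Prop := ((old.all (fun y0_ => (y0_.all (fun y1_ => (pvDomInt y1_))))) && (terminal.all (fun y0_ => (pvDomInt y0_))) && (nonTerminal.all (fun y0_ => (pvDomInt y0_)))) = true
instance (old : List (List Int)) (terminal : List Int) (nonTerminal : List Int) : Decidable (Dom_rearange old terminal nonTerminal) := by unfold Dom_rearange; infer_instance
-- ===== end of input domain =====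

-- B computes the I, R, Q blocks entry by entry from `old` via one entry function
-- (no intermediate permuted matrix, no mutation, no reversal slicing); objective: simpler.

-- ===== PORT A =====
-- literal port of A: build the permuted n×n matrix `new` by nested index loops
-- (in-place assignment = List.set; new[i]/new[i][j] reads = getD, always in range),
-- set the terminal diagonal to 1, then slice the blocks; new[::-1] is new.reverse.
def rearange (old : List (List Int)) (terminal : List Int) (nonTerminal : List Int) : List (List Int) × List (List Int) × List (List Int) :=
  let t := terminal ++ nonTerminal
  let n := old.length
  let new0 : List (List Int) := (List.range n).map (fun _ => (List.range n).map (fun _ => (0:Int)))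
  let new1 := (List.range n).foldl (fun m i =>
      (List.range n).foldl (fun m j =>
          m.set i ((m.getD i []).set j
            (PySem.List.pyGetD (PySem.List.pyGetD old (t.getD i 0) []) (t.getD j 0) 0))) m) new0
  let new2 := (List.range terminal.length).foldl (fun m i => m.set i ((m.getD i []).set i 1)) new1
  let I := (List.range terminal.length).map (fun i =>
      (List.range terminal.length).map (fun j => (new2.getD i []).getD j 0))
  let R := ((List.range nonTerminal.length).map (fun i =>
      (List.range terminal.length).map (fun j => (new2.reverse.getD i []).getD j 0))).reverse
  let Q := ((List.range nonTerminal.length).map (fun i =>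
      ((List.range nonTerminal.length).map (fun j => ((new2.reverse.getD i []).reverse).getD j 0)).reverse)).reverse
  (I, R, Q)

-- ===== PORT B =====
def rearange_alt (old : List (List Int)) (terminal : List Int) (nonTerminal : List Int) : List (List Int) × List (List Int) × List (List Int) :=
  let n := old.length
  let k := terminal.length
  let m := nonTerminal.length
  let t := terminal ++ nonTerminal
  -- e(i, j); Int indices as in Python (t[i] via pyGetD: negative indices wrap)
  let e : Int → Int → Int := fun i j =>
    if i = j ∧ i < (k : Int) then 1
    else PySem.List.pyGetD (PySem.List.pyGetD old (PySem.List.pyGetD t i 0) []) (PySem.List.pyGetD t j 0) 0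
  let I := (List.range k).map (fun (i : Nat) => (List.range k).map (fun (j : Nat) => e (i : Int) (j : Int)))
  let R := (List.range m).map (fun (i : Nat) => (List.range k).map (fun (j : Nat) => e ((n : Int) - (m : Int) + (i : Int)) (j : Int)))
  let Q := (List.range m).map (fun (i : Nat) => (List.range m).map (fun (j : Nat) => e ((n : Int) - (m : Int) + (i : Int)) ((n : Int) - (m : Int) + (j : Int))))
  (I, R, Q)

-- ===== PRECONDITION & SPEC =====
-- Pre_ is exactly the set of inputs on which A returns (no IndexError): the block
-- shapes fit inside old (k, m ≤ n ≤ k + m) and every index A reads (the first n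
-- entries of terminal+nonTerminal, against old and against each accessed row) is in
-- Python range.
def Pre_rearange (old : List (List Int)) (terminal : List Int) (nonTerminal : List Int) : Prop :=
  terminal.length ≤ old.length ∧ nonTerminal.length ≤ old.length ∧
  old.length ≤ terminal.length + nonTerminal.length ∧
  (∀ i < old.length,
    -(old.length:Int) ≤ (terminal ++ nonTerminal).getD i 0 ∧
      (terminal ++ nonTerminal).getD i 0 < old.length) ∧
  (∀ i < old.length, ∀ j < old.length,
    -((PySem.List.pyGetD old ((terminal ++ nonTerminal).getD i 0) ([]:List Int)).length:Int)
        ≤ (terminal ++ nonTerminal).getD j 0 ∧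
      (terminal ++ nonTerminal).getD j 0
        < (PySem.List.pyGetD old ((terminal ++ nonTerminal).getD i 0) ([]:List Int)).length)
instance (old : List (List Int)) (terminal : List Int) (nonTerminal : List Int) : Decidable (Pre_rearange old terminal nonTerminal) := by unfold Pre_rearange; infer_instance

def pvWitness_rearange : List (List Int) × List Int × List Int := ([[7, 2], [3, 4]], [0], [1])

def Spec_rearange (old : List (List Int)) (terminal : List Int) (nonTerminal : List Int) (out : List (List Int) × List (List Int) × List (List Int)) : Prop := out = rearange_alt old terminal nonTerminal
instance (old : List (List Int)) (terminal : List Int) (nonTerminal : List Int) (out : List (List Int) × List (List Int) × List (List Int)) : Decidable (Spec_rearange old terminal nonTerminal out) := by unfold Spec_rearange; infer_instance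

-- ===== CLAIM (what is proved, stated in full; the proofs are below) =====
def Claim_equal_rearange : Prop := ∀ (old : List (List Int)) (terminal : List Int) (nonTerminal : List Int), Dom_rearange old terminal nonTerminal → Pre_rearange old terminal nonTerminal → Spec_rearange old terminal nonTerminal (rearange old terminal nonTerminal)

-- ===== LEMMAS AND PROOFS =====

-- setting indices 0..n-1 of a list, each from its current value, in increasing order
theorem pv_foldl_set_getD {α : Type} (d : α) (F : Nat → α → α) (n : Nat) :
    ∀ (m : List α), n ≤ m.length →
    (List.range n).foldl (fun acc i => acc.set i (F i (acc.getD i d))) m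
      = (List.range n).map (fun i => F i (m.getD i d)) ++ m.drop n := by
  induction n with
  | zero => intro m _; simp
  | succ n ih =>
    intro m h
    rw [List.range_succ, List.foldl_append, List.foldl_cons, List.foldl_nil,
        ih m (by omega)]
    have hn : n < m.length := by omega
    have hmap : ((List.range n).map (fun i => F i (m.getD i d))).length = n := by simp
    have hgd : ((List.range n).map (fun i => F i (m.getD i d)) ++ m.drop n).getD n d
        = m.getD n d := by
      rw [List.getD_eq_getElem?_getD, List.getElem?_append_right (by omega)]
      simp [List.getD_eq_getElem?_getD]
    rw [hgd]
    rw [List.set_append, List.drop_eq_getElem_cons hn]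
    simp only [hmap, lt_irrefl, Nat.sub_self, List.set_cons_zero]
    simp

-- the inner j-loop only rewrites row i of the matrix
theorem pv_foldl_row {β : Type} (d : List β) (g : Nat → β) (i : Nat) :
    ∀ (L : List Nat) (m : List (List β)),
    L.foldl (fun acc j => acc.set i ((acc.getD i d).set j (g j))) m
      = m.set i (L.foldl (fun s j => s.set j (g j)) (m.getD i d)) := by
  intro L
  induction L with
  | nil =>
    intro m
    simp only [List.foldl_nil]
    by_cases h : i < m.length
    · rw [List.getD_eq_getElem m d h, List.set_getElem_self h]
    · rw [List.set_eq_of_length_le (by omega)]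
  | cons j L ih =>
    intro m
    simp only [List.foldl_cons]
    rw [ih]
    by_cases h : i < m.length
    · rw [List.getD_eq_getElem m d h,
          List.getD_eq_getElem _ d (by simpa using h),
          List.getElem_set_self (by simpa using h), List.set_set]
    · simp only [List.set_eq_of_length_le (le_of_not_gt h)]

-- closed form of the double build loop, for a generic entry function E
theorem pv_build_gen (E : Nat → Nat → Int) (n : Nat) :
    (List.range n).foldl (fun m i =>
        (List.range n).foldl (fun m j => m.set i ((m.getD i ([]:List Int)).set j (E i j))) m)
      ((List.range n).map (fun _ => (List.range n).map (fun _ => (0:Int))))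
    = (List.range n).map (fun i => (List.range n).map (fun j => E i j)) := by
  have hstep : (fun (m : List (List Int)) (i : Nat) =>
      (List.range n).foldl (fun m j => m.set i ((m.getD i ([]:List Int)).set j (E i j))) m)
      = fun m i => m.set i ((fun i r => (List.range n).foldl (fun s j => s.set j (E i j)) r) i (m.getD i [])) := by
    funext m i
    exact pv_foldl_row [] (E i) i (List.range n) m
  have h2 := pv_foldl_set_getD ([]:List Int)
      (fun i r => (List.range n).foldl (fun s j => s.set j (E i j)) r) n
      ((List.range n).map (fun _ => (List.range n).map (fun _ => (0:Int)))) (by simp)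
  rw [hstep, h2, List.drop_eq_nil_of_le (by simp), List.append_nil]
  apply List.map_congr_left
  intro i hi
  rw [List.mem_range] at hi
  dsimp only
  rw [List.getD_eq_getElem _ _ (by simpa using hi), List.getElem_map]
  have h3 := pv_foldl_set_getD (0:Int) (fun j _ => E i j) n
      ((List.range n).map (fun _ => (0:Int))) (by simp)
  simpa using h3

-- the build loop of port A, stated on its literal body
theorem pv_buildA (old : List (List Int)) (t : List Int) (n : Nat) :
    (List.range n).foldl (fun m i =>
        (List.range n).foldl (fun m j =>
            m.set i ((m.getD i []).set j
              (PySem.List.pyGetD (PySem.List.pyGetD old (t.getD i 0) []) (t.getD j 0) 0))) m)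
      ((List.range n).map (fun _ => (List.range n).map (fun _ => (0:Int))))
    = (List.range n).map (fun i => (List.range n).map (fun j =>
        PySem.List.pyGetD (PySem.List.pyGetD old (t.getD i 0) []) (t.getD j 0) 0)) :=
  pv_build_gen (fun i j => PySem.List.pyGetD (PySem.List.pyGetD old (t.getD i 0) []) (t.getD j 0) 0) n

-- the diagonal loop of port A, stated on its literal body
theorem pv_diag (tl : Nat) (m : List (List Int)) (h : tl ≤ m.length) :
    (List.range tl).foldl (fun m i => m.set i ((m.getD i []).set i 1)) m
      = (List.range tl).map (fun i => (m.getD i []).set i 1) ++ m.drop tl :=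
  pv_foldl_set_getD ([]:List Int) (fun i r => r.set i 1) tl m h

theorem rearange_eq_blocks (old : List (List Int)) (terminal nonTerminal : List Int)
    (hk : terminal.length ≤ old.length) (hm : nonTerminal.length ≤ old.length) :
    rearange old terminal nonTerminal = rearange_alt old terminal nonTerminal := by
  unfold rearange rearange_alt
  dsimp only
  rw [pv_buildA old (terminal ++ nonTerminal) old.length]
  rw [pv_diag terminal.length _ (by simp [hk])]
  set t := terminal ++ nonTerminal with ht
  set E : Nat → Nat → Int := fun i j =>
    PySem.List.pyGetD (PySem.List.pyGetD old (t.getD i 0) []) (t.getD j 0) 0 with hE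
  set new1 := (List.range old.length).map (fun i =>
    (List.range old.length).map (fun j => E i j)) with hnew1
  have hlen1 : new1.length = old.length := by simp [hnew1]
  set new2 := (List.range terminal.length).map (fun i => (new1.getD i []).set i 1)
      ++ new1.drop terminal.length with hnew2
  have hlen2 : new2.length = old.length := by simp [hnew2, hlen1]; omega
  -- row access in new2
  have hrow : ∀ i, i < old.length → new2.getD i []
      = if i < terminal.length then ((List.range old.length).map (fun j => E i j)).set i 1
        else (List.range old.length).map (fun j => E i j) := by
    intro i hi
    rw [hnew2]
    by_cases h : i < terminal.length
    · rw [if_pos h, List.getD_eq_getElem _ _ (by simp [hlen1]; omega),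
          List.getElem_append_left (by simpa using h)]
      simp only [List.getElem_map, List.getElem_range]
      congr 1
      rw [hnew1, List.getD_eq_getElem _ _ (by simp; omega)]
      simp only [List.getElem_map, List.getElem_range]
    · rw [if_neg h, List.getD_eq_getElem _ _ (by simp [hlen1]; omega),
          List.getElem_append_right (by simp; omega)]
      simp only [List.length_map, List.length_range, List.getElem_drop, hnew1,
                 List.getElem_map, List.getElem_range]
      rw [show terminal.length + (i - terminal.length) = i from by omega]
  -- the single entry both sides compute, at row r < n and column j < n
  have hentry : ∀ r j, r < old.length → j < old.length →
      (new2.getD r []).getD j 0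
        = if r = j ∧ r < terminal.length then 1 else E r j := by
    intro r j hr hj
    rw [hrow r hr]
    by_cases hrk : r < terminal.length
    · rw [if_pos hrk, List.getD_eq_getElem _ _ (by simp; omega), List.getElem_set]
      simp only [List.getElem_map, List.getElem_range]
      by_cases hrj : r = j
      · rw [if_pos hrj, if_pos ⟨hrj, hrk⟩]
      · rw [if_neg hrj, if_neg (by tauto)]
    · rw [if_neg hrk, if_neg (by tauto),
          List.getD_eq_getElem _ _ (by simp; omega)]
      simp only [List.getElem_map, List.getElem_range]
  -- B's entry function at natural indices
  have hecast : ∀ a b : Nat,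
      (if (a:Int) = (b:Int) ∧ (a:Int) < (terminal.length:Int) then (1:Int)
       else PySem.List.pyGetD (PySem.List.pyGetD old (PySem.List.pyGetD t (a:Int) 0) [])
              (PySem.List.pyGetD t (b:Int) 0) 0)
        = if a = b ∧ a < terminal.length then 1 else E a b := by
    intro a b
    simp only [PySem.List.pyGetD_natCast, hE]
    exact if_congr (by omega) rfl rfl
  refine Prod.ext ?_ (Prod.ext ?_ ?_)
  · -- I block
    dsimp only
    apply List.ext_getElem (by simp)
    intro i h1 h2
    simp only [List.getElem_map, List.getElem_range]
    apply List.ext_getElem (by simp)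
    intro j h3 h4
    simp only [List.getElem_map, List.getElem_range]
    have hi : i < terminal.length := by simpa using h1
    have hj : j < terminal.length := by simpa using h3
    rw [hentry i j (by omega) (by omega)]
    exact (hecast i j).symm
  · -- R block
    dsimp only
    apply List.ext_getElem (by simp)
    intro i h1 h2
    have hi : i < nonTerminal.length := by simpa using h2
    rw [List.getElem_reverse]
    simp only [List.getElem_map, List.getElem_range, List.length_map, List.length_range]
    apply List.ext_getElem (by simp)
    intro j h3 h4
    have hj : j < terminal.length := by simpa using h3
    simp only [List.getElem_map, List.getElem_range]
    have hrev : new2.reverse.getD (nonTerminal.length - 1 - i) []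
        = new2.getD (old.length - nonTerminal.length + i) [] := by
      rw [List.getD_eq_getElem _ _ (by simp [hlen2]; omega), List.getElem_reverse,
          List.getD_eq_getElem _ _ (by omega)]
      congr 1
      simp only [hlen2]
      omega
    rw [hrev, show ((old.length:Int) - (nonTerminal.length:Int) + (i:Int))
          = ((old.length - nonTerminal.length + i : Nat) : Int) from by omega]
    rw [hentry _ j (by omega) (by omega)]
    exact (hecast _ j).symm
  · -- Q block
    dsimp only
    apply List.ext_getElem (by simp)
    intro i h1 h2
    have hi : i < nonTerminal.length := by simpa using h2
    rw [List.getElem_reverse]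
    simp only [List.getElem_map, List.getElem_range, List.length_map, List.length_range]
    apply List.ext_getElem (by simp)
    intro j h3 h4
    have hj : j < nonTerminal.length := by simpa using h3
    rw [List.getElem_reverse]
    simp only [List.getElem_map, List.getElem_range, List.length_map, List.length_range]
    have hrev : new2.reverse.getD (nonTerminal.length - 1 - i) []
        = new2.getD (old.length - nonTerminal.length + i) [] := by
      rw [List.getD_eq_getElem _ _ (by simp [hlen2]; omega), List.getElem_reverse,
          List.getD_eq_getElem _ _ (by omega)]
      congr 1
      simp only [hlen2]
      omega
    rw [hrev, show ((old.length:Int) - (nonTerminal.length:Int) + (i:Int))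
          = ((old.length - nonTerminal.length + i : Nat) : Int) from by omega,
        show ((old.length:Int) - (nonTerminal.length:Int) + (j:Int))
          = ((old.length - nonTerminal.length + j : Nat) : Int) from by omega,
        hecast (old.length - nonTerminal.length + i) (old.length - nonTerminal.length + j)]
    -- the reversed row access: row[::-1][m-1-j] is row[n-m+j]
    rw [hrow _ (by omega)]
    by_cases hrk : old.length - nonTerminal.length + i < terminal.length
    · rw [if_pos hrk, List.getD_eq_getElem _ _ (by simp; omega), List.getElem_reverse,
          List.getElem_set]
      simp only [List.length_set, List.length_map, List.length_range,
                 List.getElem_map, List.getElem_range]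
      rw [show old.length - 1 - (nonTerminal.length - 1 - j)
            = old.length - nonTerminal.length + j from by omega]
      by_cases hij : old.length - nonTerminal.length + i = old.length - nonTerminal.length + j
      · rw [if_pos hij, if_pos ⟨hij, hrk⟩]
      · rw [if_neg hij, if_neg (by tauto)]
    · rw [if_neg hrk, if_neg (by tauto), List.getD_eq_getElem _ _ (by simp; omega),
          List.getElem_reverse]
      simp only [List.length_map, List.length_range, List.getElem_map, List.getElem_range]
      rw [show old.length - 1 - (nonTerminal.length - 1 - j)
            = old.length - nonTerminal.length + j from by omega]

-- ===== VERDICT (by name: the statement is the Claim_ definition above) =====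
theorem rearange_spec : Claim_equal_rearange := by
  intro old terminal nonTerminal _ hpre
  exact rearange_eq_blocks old terminal nonTerminal hpre.1 hpre.2.1
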